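-- pv_equiv track=rewrite | github.com/MarcusFBarreto/pesquisapromo | aplicar_diff_v3.py | _parse_substituicoes
-- ===== SOURCE A (Python) =====
-- def _parse_substituicoes(diff_texto: str) -> list[tuple[str, str]]:
--     blocos: list[tuple[str, str]] = []
--     antigo_linhas: list[str] = []
--     novo_linhas: list[str] = []
--     for linha in diff_texto.splitlines():
--         if linha.startswith("- "):
--             antigo_linhas.append(linha[2:])
--         elif linha.startswith("+ "):
--             novo_linhas.append(linha[2:])
--         elif not linha.strip():
--             if antigo_linhas or novo_linhas:
--                 blocos.append(("\n".join(antigo_linhas), "\n".join(novo_linhas)))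
--                 antigo_linhas, novo_linhas = [], []
--
--     if antigo_linhas or novo_linhas:
--         blocos.append(("\n".join(antigo_linhas), "\n".join(novo_linhas)))
--     return blocos
-- ===== SOURCE B (Python) =====
-- def _parse_substituicoes(diff_texto: str) -> list[tuple[str, str]]:
--     # Phase 1: segment the lines into maximal runs separated by blank lines.
--     segmentos: list[list[str]] = []
--     atual: list[str] = []
--     for linha in diff_texto.splitlines():
--         if linha.strip():
--             atual.append(linha)
--         else:
--             segmentos.append(atual)
--             atual = []
--     segmentos.append(atual)
--     # Phase 2: map each segment to an (old, new) pair; keep only non-empty ones.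
--     blocos: list[tuple[str, str]] = []
--     for seg in segmentos:
--         antigo = [l[2:] for l in seg if l.startswith("- ")]
--         novo = [l[2:] for l in seg if l.startswith("+ ")]
--         if antigo or novo:
--             blocos.append(("\n".join(antigo), "\n".join(novo)))
--     return blocos
-- ===== Notes on version B (the rewrite author's own statement) =====
-- stated objective: alternative
-- what changed: Replaces A's single fold carrying three mutable accumulators (blocks, old lines, new lines) with a two-phase decomposition: first split the lines into blank-separated segments, then map each segment independently to its (old, new) pair, keeping only segments that contain diff lines.
import Mathlib
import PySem

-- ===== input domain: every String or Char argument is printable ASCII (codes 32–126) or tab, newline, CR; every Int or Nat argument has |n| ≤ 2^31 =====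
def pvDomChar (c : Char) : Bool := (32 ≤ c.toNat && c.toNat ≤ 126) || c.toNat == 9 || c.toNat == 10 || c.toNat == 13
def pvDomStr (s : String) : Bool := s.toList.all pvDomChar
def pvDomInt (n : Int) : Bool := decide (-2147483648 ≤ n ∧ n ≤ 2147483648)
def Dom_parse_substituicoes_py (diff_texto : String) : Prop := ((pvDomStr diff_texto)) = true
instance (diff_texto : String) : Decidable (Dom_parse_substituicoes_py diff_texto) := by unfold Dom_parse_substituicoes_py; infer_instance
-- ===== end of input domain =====

-- B re-parses the diff in two phases (segment the lines at blank lines, then map each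
-- segment to a pair) instead of A's single fold with three accumulators; alternative decomposition, same cost.


-- ===== PORT A =====
-- A's loop body: one fold over the lines carrying (blocos, antigo_linhas, novo_linhas).
def pvStepA (st : List (String × String) × List String × List String) (linha : String) :
    List (String × String) × List String × List String :=
  if PySem.Str.startswith linha "- " then
    (st.1, st.2.1 ++ [PySem.Str.slice linha (some 2) none], st.2.2)
  else if PySem.Str.startswith linha "+ " then
    (st.1, st.2.1, st.2.2 ++ [PySem.Str.slice linha (some 2) none])
  else if PySem.Str.strip linha = "" then
    if st.2.1 ≠ [] ∨ st.2.2 ≠ [] then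
      (st.1 ++ [(PySem.Str.join "\n" st.2.1, PySem.Str.join "\n" st.2.2)], [], [])
    else st
  else st

def parse_substituicoes_py (diff_texto : String) : List (String × String) :=
  let st := (PySem.Str.splitlines diff_texto).foldl pvStepA ([], [], [])
  if st.2.1 ≠ [] ∨ st.2.2 ≠ [] then
    st.1 ++ [(PySem.Str.join "\n" st.2.1, PySem.Str.join "\n" st.2.2)]
  else st.1

-- ===== PORT B =====
-- Phase 1: segment the lines into blank-separated runs (state: finished segments, current run).
def pvSegStep (st : List (List String) × List String) (linha : String) :
    List (List String) × List String :=
  if PySem.Str.strip linha ≠ "" then (st.1, st.2 ++ [linha])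
  else (st.1 ++ [st.2], [])

-- Source B's comprehensions: the "- " lines resp. "+ " lines of a segment, 2-char prefix stripped
def pvMns (seg : List String) : List String :=
  (seg.filter (fun l => PySem.Str.startswith l "- ")).map (fun l => PySem.Str.slice l (some 2) none)
def pvPls (seg : List String) : List String :=
  (seg.filter (fun l => PySem.Str.startswith l "+ ")).map (fun l => PySem.Str.slice l (some 2) none)

-- Phase 2: a segment becomes a pair iff it contains at least one "- " or "+ " line.
def pvBlocoOf (seg : List String) : Option (String × String) :=
  if pvMns seg ≠ [] ∨ pvPls seg ≠ [] then
    some (PySem.Str.join "\n" (pvMns seg), PySem.Str.join "\n" (pvPls seg))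
  else none

def parse_substituicoes_py_alt (diff_texto : String) : List (String × String) :=
  let st := (PySem.Str.splitlines diff_texto).foldl pvSegStep ([], [])
  (st.1 ++ [st.2]).filterMap pvBlocoOf

-- ===== PRECONDITION & SPEC =====
def Spec_parse_substituicoes_py (diff_texto : String) (out : List (String × String)) : Prop := out = parse_substituicoes_py_alt diff_texto
instance (diff_texto : String) (out : List (String × String)) : Decidable (Spec_parse_substituicoes_py diff_texto out) := by unfold Spec_parse_substituicoes_py; infer_instance

-- ===== CLAIM (what is proved, stated in full; the proofs are below) =====
def Claim_equal_parse_substituicoes_py : Prop := ∀ (diff_texto : String), Dom_parse_substituicoes_py diff_texto → Spec_parse_substituicoes_py diff_texto (parse_substituicoes_py diff_texto)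

-- ===== LEMMAS AND PROOFS =====

-- A's final flush, as a function of the fold state.
def pvFinA (st : List (String × String) × List String × List String) : List (String × String) :=
  if st.2.1 ≠ [] ∨ st.2.2 ≠ [] then
    st.1 ++ [(PySem.Str.join "\n" st.2.1, PySem.Str.join "\n" st.2.2)]
  else st.1

-- a string starting with a non-space character does not strip to empty
lemma strip_ne_empty_of_startswith (l : String) (c : Char)
    (hc : PySem.Chars.isspace c = false)
    (h : PySem.Str.startswith l (String.ofList [c, ' ']) = true) :
    ¬ PySem.Str.strip l = "" := by
  intro he
  have h' : [c, ' '] <+: l.toList := by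
    have := (PySem.Chars.startswith_iff l.toList [c, ' ']).mp (by simpa [PySem.Str.startswith] using h)
    exact this
  have hmem : c ∈ l.toList := h'.mem (by simp)
  have he' : PySem.Chars.strip l.toList = [] := by
    have := congrArg String.toList he
    simpa [PySem.Str.toList_strip] using this
  -- strip = [] forces every char (in particular c) to be whitespace
  have hmem' : c ∈ List.takeWhile PySem.Chars.isspace l.toList ++ List.dropWhile PySem.Chars.isspace l.toList := by
    rw [List.takeWhile_append_dropWhile]; exact hmem
  have h1 : c ∈ PySem.Chars.lstrip l.toList := by
    rcases List.mem_append.mp hmem' with h1 | h1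
    · exact absurd (List.mem_takeWhile_imp h1) (by simp [hc])
    · exact h1
  have h2 : ∀ x ∈ (PySem.Chars.lstrip l.toList).reverse, PySem.Chars.isspace x := by
    have : List.dropWhile PySem.Chars.isspace (PySem.Chars.lstrip l.toList).reverse = [] := by
      have := congrArg List.reverse he'
      simpa [PySem.Chars.strip, PySem.Chars.rstrip] using this
    simpa [List.dropWhile_eq_nil_iff] using this
  have := h2 c (by simpa using h1)
  simp [hc] at this

lemma not_startswith_plus_of_dash (l : String)
    (h : PySem.Str.startswith l "- " = true) :
    PySem.Str.startswith l "+ " = false := by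
  have h' : ['-', ' '] <+: l.toList :=
    (PySem.Chars.startswith_iff l.toList ['-', ' ']).mp (by simpa [PySem.Str.startswith] using h)
  obtain ⟨t, ht⟩ := h'
  simp [PySem.Str.startswith, PySem.Chars.startswith, ← ht, List.isPrefixOf]

lemma segShift (ls : List String) (segs : List (List String)) (cur : List String) :
    ls.foldl pvSegStep (segs, cur)
      = (segs ++ (ls.foldl pvSegStep ([], cur)).1, (ls.foldl pvSegStep ([], cur)).2) := by
  induction ls generalizing segs cur with
  | nil => simp
  | cons l ls ih =>
    simp only [List.foldl_cons, pvSegStep]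
    by_cases h : PySem.Str.strip l ≠ ""
    · simp only [if_pos h]
      exact ih _ _
    · simp only [if_neg h]
      rw [ih (segs ++ [cur]) [], ih ([] ++ [cur]) []]
      simp

lemma main_lemma (ls : List String) (blocos : List (String × String)) (seg : List String) :
    pvFinA (ls.foldl pvStepA (blocos, pvMns seg, pvPls seg))
      = blocos ++
        (((ls.foldl pvSegStep ([], seg)).1 ++ [(ls.foldl pvSegStep ([], seg)).2]).filterMap pvBlocoOf) := by
  induction ls generalizing blocos seg with
  | nil =>
    simp only [List.foldl_nil, List.nil_append, List.filterMap_cons, List.filterMap_nil]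
    unfold pvFinA pvBlocoOf
    split_ifs with h <;> simp
  | cons l ls ih =>
    simp only [List.foldl_cons]
    by_cases h1 : PySem.Str.startswith l "- " = true
    · have h2 : PySem.Str.startswith l "+ " = false := not_startswith_plus_of_dash l h1
      have h1c : PySem.Chars.startswith l.toList ['-', ' '] = true := by
        simpa [PySem.Str.startswith] using h1
      have h2c : PySem.Chars.startswith l.toList ['+', ' '] = false := by
        simpa [PySem.Str.startswith] using h2
      have hs : ¬ PySem.Str.strip l = "" :=
        strip_ne_empty_of_startswith l '-' (by decide) (by simpa using h1)
      have hA : pvStepA (blocos, pvMns seg, pvPls seg) l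
          = (blocos, pvMns (seg ++ [l]), pvPls (seg ++ [l])) := by
        simp [pvStepA, pvMns, pvPls, List.filter_append, h1c, h2c]
      have hB : pvSegStep ([], seg) l = ([], seg ++ [l]) := by
        simp [pvSegStep, hs]
      rw [hA, hB]
      exact ih blocos (seg ++ [l])
    · by_cases h2 : PySem.Str.startswith l "+ " = true
      · have h1c : PySem.Chars.startswith l.toList ['-', ' '] = false := by
          simpa [PySem.Str.startswith] using h1
        have h2c : PySem.Chars.startswith l.toList ['+', ' '] = true := by
          simpa [PySem.Str.startswith] using h2
        have hs : ¬ PySem.Str.strip l = "" :=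
          strip_ne_empty_of_startswith l '+' (by decide) (by simpa using h2)
        have hA : pvStepA (blocos, pvMns seg, pvPls seg) l
            = (blocos, pvMns (seg ++ [l]), pvPls (seg ++ [l])) := by
          simp [pvStepA, pvMns, pvPls, List.filter_append, h1c, h2c]
        have hB : pvSegStep ([], seg) l = ([], seg ++ [l]) := by
          simp [pvSegStep, hs]
        rw [hA, hB]
        exact ih blocos (seg ++ [l])
      · have h1c : PySem.Chars.startswith l.toList ['-', ' '] = false := by
          simpa [PySem.Str.startswith] using h1
        have h2c : PySem.Chars.startswith l.toList ['+', ' '] = false := by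
          simpa [PySem.Str.startswith] using h2
        by_cases hb : PySem.Str.strip l = ""
        · have hB : pvSegStep ([], seg) l = ([seg], []) := by
            simp [pvSegStep, hb]
          rw [hB, segShift ls [seg] []]
          have hA : pvStepA (blocos, pvMns seg, pvPls seg) l
              = (blocos ++ (pvBlocoOf seg).toList, pvMns [], pvPls []) := by
            unfold pvStepA pvBlocoOf
            rw [if_neg h1, if_neg h2, if_pos hb]
            split_ifs with h
            · simp [pvMns, pvPls]
            · obtain ⟨ha, hp⟩ := not_or.mp h
              have ha' : pvMns seg = [] := by simpa using not_not.mp ha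
              have hp' : pvPls seg = [] := by simpa using not_not.mp hp
              simp only [pvMns, List.map_eq_nil_iff, List.filter_eq_nil_iff] at ha'
              simp only [pvPls, List.map_eq_nil_iff, List.filter_eq_nil_iff] at hp'
              simp [pvMns, pvPls]
              exact ⟨fun a hm => by simpa using ha' a hm, fun a hm => by simpa using hp' a hm⟩
          rw [hA, ih (blocos ++ (pvBlocoOf seg).toList) []]
          cases hO : pvBlocoOf seg <;> simp [hO]
        · have hA : pvStepA (blocos, pvMns seg, pvPls seg) l
              = (blocos, pvMns (seg ++ [l]), pvPls (seg ++ [l])) := by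
            simp [pvStepA, pvMns, pvPls, List.filter_append, h1c, h2c, hb]
          have hB : pvSegStep ([], seg) l = ([], seg ++ [l]) := by
            simp [pvSegStep, hb]
          rw [hA, hB]
          exact ih blocos (seg ++ [l])

-- ===== VERDICT (by name: the statement is the Claim_ definition above) =====
theorem parse_substituicoes_py_spec : Claim_equal_parse_substituicoes_py := by
  intro s _
  show parse_substituicoes_py s = parse_substituicoes_py_alt s
  have h := main_lemma (PySem.Str.splitlines s) [] []
  simpa [parse_substituicoes_py, parse_substituicoes_py_alt, pvFinA, pvMns, pvPls] using h
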